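-- pv_equiv track=rewrite | github.com/denkovarik/NFA-to-Regex | utilities.py | inParentheses
-- ===== SOURCE A (Python) =====
-- def inParentheses(regex, i):
--     """
--     Determines if character at index i is inside a set of parentheses.
--
--     :param regex: The regular expression
--     :param i: The index of the reference character
--     :return: 1 if character at index i is inside a set of parentheses
--     :return: 0 otherwise
--     """
--     s = i
--     e = i
--     pcs = 0
--     pce = 0
--     inPara = 0
--
--     # Determine if in parentheses
--     while s >= 0:
--         if regex[s] == ')':
--             pcs += 1
--         elif regex[s] == '(' and pcs != 0:
--             pcs -= 1
--         elif regex[s] == '(' and pcs == 0: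
--             while e < len(regex):
--                 if regex[e] == '(':
--                     pce += 1
--                 elif regex[e] == ')' and pce != 0:
--                     pce -= 1
--                 elif regex[e] == ')' and pce == 0:
--                     inPara = 1
--                     return 1
--                 e += 1
--         s -= 1
--     return 0
-- ===== SOURCE B (Python) =====
-- def inParentheses(regex, i):
--     # Saturating prefix-depth formulation instead of searching for an unmatched
--     # delimiter: the clamped '('-depth of regex[0..i] and the clamped ')'-depth
--     # of regex[i:] scanned right-to-left; index i is inside parentheses iff
--     # both depths are positive.
--     if i < 0:
--         return 0
--     d = 0
--     for j in range(i + 1):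
--         if regex[j] == '(':
--             d += 1
--         elif regex[j] == ')' and d > 0:
--             d -= 1
--     r = 0
--     for ch in reversed(regex[i:]):
--         if ch == ')':
--             r += 1
--         elif ch == '(' and r > 0:
--             r -= 1
--     return 1 if d > 0 and r > 0 else 0
-- ===== Notes on version B (the rewrite author's own statement) =====
-- stated objective: alternative
-- what changed: Replaces A's search for an unmatched '(' (backward scan with break) plus nested forward search for an unmatched ')' by two exhaustive saturating-depth folds: the clamped '('-depth of regex[:i+1] and the clamped ')'-depth of regex[i:] taken right-to-left; the answer is 1 iff both depths are positive.
import Mathlib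
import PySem

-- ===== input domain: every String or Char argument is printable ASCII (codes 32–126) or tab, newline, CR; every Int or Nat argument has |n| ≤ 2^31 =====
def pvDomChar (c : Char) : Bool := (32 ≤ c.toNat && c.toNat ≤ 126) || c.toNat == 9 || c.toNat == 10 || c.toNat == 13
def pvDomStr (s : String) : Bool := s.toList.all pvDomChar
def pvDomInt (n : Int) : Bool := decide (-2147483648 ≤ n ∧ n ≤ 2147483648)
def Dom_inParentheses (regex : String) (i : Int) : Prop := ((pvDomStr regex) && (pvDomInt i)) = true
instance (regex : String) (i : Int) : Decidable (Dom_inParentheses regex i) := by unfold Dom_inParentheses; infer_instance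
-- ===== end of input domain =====

-- B replaces A's nested unmatched-delimiter searches by two exhaustive saturating-depth
-- folds over the slices regex[:i+1] and reversed(regex[i:]); same cost, different algorithm.


-- ===== PORT A =====
-- inner while loop over e: Sum.inl () encodes Python's `return 1`,
-- Sum.inr (e, pce) the fall-through with the final loop state.
def innerA (cs : List Char) (e : Nat) (pce : Int) : Sum Unit (Nat × Int) :=
  match h : cs[e]? with
  | none => Sum.inr (e, pce)      -- e < len(regex) loop guard failed
  | some c =>
    if c = '(' then innerA cs (e+1) (pce+1)
    else if c = ')' ∧ pce ≠ 0 then innerA cs (e+1) (pce-1)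
    else if c = ')' ∧ pce = 0 then Sum.inl ()
    else innerA cs (e+1) pce
termination_by cs.length - e
decreasing_by all_goals (obtain ⟨hlt, -⟩ := List.getElem?_eq_some_iff.mp h; omega)

-- outer while loop over s (only entered with s ≥ 0, so s : Nat);
-- cs[s]? = none is Python's IndexError, excluded by Pre_ (value 0 arbitrary there).
def outerA (cs : List Char) (s : Nat) (e : Nat) (pcs pce : Int) : Int :=
  match cs[s]? with
  | none => 0
  | some c =>
    if c = ')' then
      if s = 0 then 0 else outerA cs (s-1) e (pcs+1) pce
    else if c = '(' ∧ pcs ≠ 0 then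
      if s = 0 then 0 else outerA cs (s-1) e (pcs-1) pce
    else if c = '(' ∧ pcs = 0 then
      match innerA cs e pce with
      | Sum.inl _ => 1
      | Sum.inr ep => if s = 0 then 0 else outerA cs (s-1) ep.1 pcs ep.2
    else
      if s = 0 then 0 else outerA cs (s-1) e pcs pce
termination_by s
decreasing_by all_goals omega

def inParentheses (regex : String) (i : Int) : Int :=
  if i < 0 then 0   -- while s >= 0 fails immediately
  else outerA regex.toList i.toNat i.toNat 0 0

-- ===== PORT B =====
-- the two loop bodies of Source B, as fold steps
def pvStepL (d : Int) (ch : Char) : Int :=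
  if ch = '(' then d + 1 else if ch = ')' ∧ d > 0 then d - 1 else d
def pvStepR (r : Int) (ch : Char) : Int :=
  if ch = ')' then r + 1 else if ch = '(' ∧ r > 0 then r - 1 else r

-- for j in range(i+1): regex[j] — inside Pre_ every j ≤ i < len, so getD's default is
-- never read (outside Pre_ Python raises IndexError there, which Pre_ excludes);
-- regex[i:] with i ≥ 0 is drop i, reversed(...) is .reverse
def inParentheses_alt (regex : String) (i : Int) : Int :=
  if i < 0 then 0
  else
    let d := (List.range (i.toNat + 1)).foldl (fun d j => pvStepL d ((regex.toList).getD j ' ')) 0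
    let r := (((regex.toList).drop i.toNat).reverse).foldl pvStepR 0
    if 0 < d ∧ 0 < r then 1 else 0

-- ===== PRECONDITION & SPEC =====
-- Pre_ excludes exactly the inputs where both Pythons raise IndexError: 0 ≤ i with i ≥ len(regex).
def Pre_inParentheses (regex : String) (i : Int) : Prop := i < (regex.length : Int)
instance (regex : String) (i : Int) : Decidable (Pre_inParentheses regex i) := by
  unfold Pre_inParentheses; infer_instance

def pvWitness_inParentheses : String × Int := ("(a)", 1)

def Spec_inParentheses (regex : String) (i : Int) (out : Int) : Prop := out = inParentheses_alt regex i
instance (regex : String) (i : Int) (out : Int) : Decidable (Spec_inParentheses regex i out) := by unfold Spec_inParentheses; infer_instance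

-- ===== CLAIM (what is proved, stated in full; the proofs are below) =====
def Claim_equal_inParentheses : Prop := ∀ (regex : String) (i : Int), Dom_inParentheses regex i → Pre_inParentheses regex i → Spec_inParentheses regex i (inParentheses regex i)

-- ===== LEMMAS AND PROOFS =====

-- Proof-only intermediate forms: A's two searches as flat boolean scans.
def leftScanB (cs : List Char) (s : Nat) (c : Int) : Bool :=
  match cs[s]? with
  | none => false
  | some ch =>
    if ch = ')' then (if s = 0 then false else leftScanB cs (s-1) (c+1))
    else if ch = '(' then
      (if c = 0 then true else if s = 0 then false else leftScanB cs (s-1) (c-1))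
    else (if s = 0 then false else leftScanB cs (s-1) c)
termination_by s
decreasing_by all_goals omega

def rightScanB (cs : List Char) (e : Nat) (d : Int) : Bool :=
  match h : cs[e]? with
  | none => false
  | some ch =>
    if ch = '(' then rightScanB cs (e+1) (d+1)
    else if ch = ')' then (if d = 0 then true else rightScanB cs (e+1) (d-1))
    else rightScanB cs (e+1) d
termination_by cs.length - e
decreasing_by all_goals (obtain ⟨hlt, -⟩ := List.getElem?_eq_some_iff.mp h; omega)

-- A's inner loop on an exhausted index e (≥ len) falls straight through.
theorem innerA_of_len (cs : List Char) (e : Nat) (pce : Int) (he : cs.length ≤ e) :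
    innerA cs e pce = Sum.inr (e, pce) := by
  have h : cs[e]? = none := List.getElem?_eq_none he
  rw [innerA]; split <;> simp_all

-- B's right-search form decides exactly whether A's inner loop returns 1.
theorem rightScanB_eq_innerA (cs : List Char) (e : Nat) (d : Int) :
    rightScanB cs e d = (match innerA cs e d with | Sum.inl _ => true | Sum.inr _ => false) := by
  fun_induction innerA cs e d
  all_goals (rw [rightScanB]; split <;> simp_all)

-- A's inner loop, when it falls through, leaves e at len(regex).
theorem innerA_inr_len (cs : List Char) (e : Nat) (d : Int) (e' : Nat) (p' : Int)
    (h : innerA cs e d = Sum.inr (e', p')) : cs.length ≤ e' := by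
  fun_induction innerA cs e d generalizing e' p'
  all_goals simp_all

-- Once the inner state is exhausted (e ≥ len), A's outer loop can only return 0.
theorem outerA_exhausted (cs : List Char) (e : Nat) (he : cs.length ≤ e) :
    ∀ (s : Nat) (pcs pce : Int), outerA cs s e pcs pce = 0 := by
  intro s
  induction s using Nat.strong_induction_on with
  | _ s ih =>
    intro pcs pce
    rw [outerA]
    cases hg : cs[s]? with
    | none => simp
    | some c =>
      simp only [innerA_of_len cs e pce he]
      split_ifs <;> first | rfl | exact ih _ (by omega) _ _

-- If the inner scan would succeed, A's outer loop computes the left search.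
theorem outerA_of_inl (cs : List Char) (e : Nat) (pce : Int)
    (hin : innerA cs e pce = Sum.inl ()) (s : Nat) (pcs : Int) :
    outerA cs s e pcs pce = (if leftScanB cs s pcs then 1 else 0) := by
  induction s using Nat.strong_induction_on generalizing pcs with
  | _ s ih =>
    rw [outerA, leftScanB]
    cases hg : cs[s]? with
    | none => simp
    | some c =>
      simp only [hin]
      by_cases h1 : c = ')'
      · by_cases hs : s = 0
        · simp [h1, hs]
        · simp [h1, hs, ih (s-1) (by omega)]
      · by_cases hc : c = '('
        · by_cases hp : pcs = 0
          · simp [hc, hp]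
          · by_cases hs : s = 0
            · simp [hc, hp, hs]
            · simp [hc, hp, hs, ih (s-1) (by omega)]
        · by_cases hs : s = 0
          · simp [h1, hc, hs]
          · simp [h1, hc, hs, ih (s-1) (by omega)]

-- If the inner scan falls through, A's outer loop returns 0 for every s, pcs.
theorem outerA_of_inr (cs : List Char) (e : Nat) (pce : Int) (ep : Nat × Int)
    (hin : innerA cs e pce = Sum.inr ep) (s : Nat) (pcs : Int) :
    outerA cs s e pcs pce = 0 := by
  have hlen : cs.length ≤ ep.1 := innerA_inr_len cs e pce ep.1 ep.2 (by rw [hin])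
  induction s using Nat.strong_induction_on generalizing pcs with
  | _ s ih =>
    rw [outerA]
    cases hg : cs[s]? with
    | none => simp
    | some c =>
      simp only [hin]
      split_ifs <;>
        first
          | rfl
          | exact ih _ (by omega) _
          | exact outerA_exhausted cs ep.1 hlen _ _ _

-- B's saturating folds keep their accumulator nonnegative.
theorem foldl_pvStepL_nonneg (cs : List Char) : ∀ (d : Int), 0 ≤ d → 0 ≤ cs.foldl pvStepL d := by
  induction cs with
  | nil => intro d hd; simpa using hd
  | cons ch cs ih =>
    intro d hd
    simp only [List.foldl_cons]
    apply ih
    unfold pvStepL; split_ifs <;> omega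

theorem foldl_pvStepR_nonneg (cs : List Char) : ∀ (d : Int), 0 ≤ d → 0 ≤ cs.foldl pvStepR d := by
  induction cs with
  | nil => intro d hd; simpa using hd
  | cons ch cs ih =>
    intro d hd
    simp only [List.foldl_cons]
    apply ih
    unfold pvStepR; split_ifs <;> omega

-- Bridge: the left search equals "pending count c below the clamped depth of cs[:s+1]".
theorem left_bridge (cs : List Char) :
    ∀ (s : Nat), s < cs.length → ∀ (c : Int), 0 ≤ c →
      leftScanB cs s c = decide (c < (cs.take (s+1)).foldl pvStepL 0) := by
  intro s
  induction s using Nat.strong_induction_on with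
  | _ s ih =>
    intro hs c hc
    have hg : cs[s]? = some cs[s] := List.getElem?_eq_getElem hs
    have htake : cs.take (s+1) = cs.take s ++ [cs[s]] := by
      rw [List.take_succ, hg]; rfl
    have hD : 0 ≤ (cs.take s).foldl pvStepL 0 := foldl_pvStepL_nonneg _ 0 le_rfl
    rw [leftScanB, hg, htake, List.foldl_append]
    simp only [List.foldl_cons, List.foldl_nil]
    by_cases h1 : cs[s] = ')'
    · by_cases hz : s = 0
      · subst hz
        simp [h1, pvStepL]; omega
      · rw [if_pos h1, if_neg hz, ih (s-1) (by omega) (by omega) (c+1) (by omega)]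
        have hss : s - 1 + 1 = s := by omega
        rw [hss]
        by_cases hD0 : (0:Int) < (cs.take s).foldl pvStepL 0
        · simp [h1, pvStepL, hD0, decide_eq_decide]; try omega
        · simp [h1, pvStepL, hD0, decide_eq_decide]; try omega
    · by_cases h2 : cs[s] = '('
      · rw [if_neg h1, if_pos h2]
        by_cases hc0 : c = 0
        · simp [hc0, h2, pvStepL]; omega
        · rw [if_neg hc0]
          by_cases hz : s = 0
          · subst hz
            simp [h2, pvStepL]; omega
          · rw [if_neg hz, ih (s-1) (by omega) (by omega) (c-1) (by omega)]
            have hss : s - 1 + 1 = s := by omega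
            rw [hss]
            simp [h2, pvStepL, decide_eq_decide]; try omega
      · rw [if_neg h1, if_neg h2]
        by_cases hz : s = 0
        · subst hz
          simp [h1, h2, pvStepL]; omega
        · rw [if_neg hz, ih (s-1) (by omega) (by omega) c hc]
          have hss : s - 1 + 1 = s := by omega
          rw [hss]
          simp [h1, h2, pvStepL]

-- Bridge: the right search equals "pending count c below the clamped reverse depth of cs[e:]".
theorem right_bridge (cs : List Char) :
    ∀ (k e : Nat), cs.length - e ≤ k → ∀ (c : Int), 0 ≤ c →
      rightScanB cs e c = decide (c < ((cs.drop e).reverse).foldl pvStepR 0) := by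
  intro k
  induction k with
  | zero =>
    intro e hk c hc
    have he : cs.length ≤ e := by omega
    have hd : cs.drop e = [] := List.drop_eq_nil_of_le he
    rw [rightScanB]
    split
    · simp [hd]; omega
    · rename_i ch hg
      rw [List.getElem?_eq_none he] at hg
      simp at hg
  | succ k ih =>
    intro e hk c hc
    rw [rightScanB]
    split
    · rename_i hg
      have he : cs.length ≤ e := by
        by_contra hlt
        rw [List.getElem?_eq_getElem (by omega)] at hg
        simp at hg
      have hd : cs.drop e = [] := List.drop_eq_nil_of_le he
      simp [hd]; omega
    · rename_i ch hg
      have he : e < cs.length := by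
        by_contra hge
        rw [List.getElem?_eq_none (by omega)] at hg
        simp at hg
      have hch : cs[e] = ch := by
        have h2 := List.getElem?_eq_getElem he
        rw [hg] at h2; exact (Option.some.inj h2).symm
      have hdrop : cs.drop e = ch :: cs.drop (e+1) := by
        rw [List.drop_eq_getElem_cons he, hch]
      have hR : 0 ≤ ((cs.drop (e+1)).reverse).foldl pvStepR 0 := foldl_pvStepR_nonneg _ 0 le_rfl
      rw [hdrop]
      simp only [List.reverse_cons, List.foldl_append, List.foldl_cons, List.foldl_nil]
      obtain ⟨R, hRg⟩ : ∃ R, ((cs.drop (e+1)).reverse).foldl pvStepR 0 = R := ⟨_, rfl⟩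
      rw [hRg] at hR ⊢
      by_cases h1 : ch = '('
      · rw [if_pos h1, ih (e+1) (by omega) (c+1) (by omega), hRg]
        by_cases hR0 : (0:Int) < R
        · simp [h1, pvStepR, hR0, decide_eq_decide]; try omega
        · simp [h1, pvStepR, hR0, decide_eq_decide]; try omega
      · by_cases h2 : ch = ')'
        · rw [if_neg h1, if_pos h2]
          by_cases hc0 : c = 0
          · simp [hc0, h2, pvStepR]; omega
          · rw [if_neg hc0, ih (e+1) (by omega) (c-1) (by omega), hRg]
            simp [h2, pvStepR, decide_eq_decide]; try omega
        · rw [if_neg h1, if_neg h2, ih (e+1) (by omega) c hc, hRg]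
          simp [h1, h2, pvStepR]

-- B's index loop over range(i+1) computes the fold of pvStepL over cs[:i+1].
theorem rangeFold_eq_takeFold (cs : List Char) :
    ∀ (n : Nat), n ≤ cs.length → ∀ (a : Int),
      (List.range n).foldl (fun d j => pvStepL d (cs.getD j ' ')) a
        = (cs.take n).foldl pvStepL a := by
  intro n
  induction n with
  | zero => simp
  | succ n ih =>
    intro hn a
    have hlt : n < cs.length := by omega
    rw [List.range_succ, List.foldl_append, ih (by omega)]
    have h1 : cs.take (n+1) = cs.take n ++ [cs[n]] := by
      rw [List.take_succ, List.getElem?_eq_getElem hlt]; rfl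
    rw [h1, List.foldl_append]
    simp [List.getD, List.getElem?_eq_getElem hlt]

-- ===== VERDICT (by name: the statement is the Claim_ definition above) =====
theorem inParentheses_spec : Claim_equal_inParentheses := by
  intro regex i _ hpre
  by_cases hi : i < 0
  · simp [Spec_inParentheses, inParentheses, inParentheses_alt, hi]
  · have hlen : i.toNat < regex.toList.length := by
      unfold Pre_inParentheses at hpre
      rw [← String.length_toList] at hpre
      omega
    have hBval : inParentheses_alt regex i
        = if 0 < (regex.toList.take (i.toNat+1)).foldl pvStepL 0
             ∧ 0 < ((regex.toList.drop i.toNat).reverse).foldl pvStepR 0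
          then 1 else 0 := by
      unfold inParentheses_alt
      rw [if_neg hi]
      rw [rangeFold_eq_takeFold regex.toList (i.toNat+1) (by omega) 0]
    have hL : leftScanB regex.toList i.toNat 0
        = decide (0 < (regex.toList.take (i.toNat+1)).foldl pvStepL 0) :=
      left_bridge regex.toList i.toNat hlen 0 le_rfl
    have hRb : rightScanB regex.toList i.toNat 0
        = decide (0 < ((regex.toList.drop i.toNat).reverse).foldl pvStepR 0) :=
      right_bridge regex.toList (regex.toList.length - i.toNat) i.toNat le_rfl 0 le_rfl
    unfold Spec_inParentheses inParentheses
    rw [if_neg hi, hBval]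
    cases hin : innerA regex.toList i.toNat 0 with
    | inl u =>
      cases u
      rw [outerA_of_inl regex.toList i.toNat 0 hin i.toNat 0]
      have hr2 : 0 < ((regex.toList.drop i.toNat).reverse).foldl pvStepR 0 := by
        have h3 := rightScanB_eq_innerA regex.toList i.toNat 0
        rw [hin, hRb] at h3
        exact of_decide_eq_true h3
      by_cases hx : 0 < (regex.toList.take (i.toNat+1)).foldl pvStepL 0
      · have hls : leftScanB regex.toList i.toNat 0 = true := by
          rw [hL]; exact decide_eq_true hx
        rw [if_pos hls, if_pos ⟨hx, hr2⟩]
      · have hls : leftScanB regex.toList i.toNat 0 = false := by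
          rw [hL]; exact decide_eq_false hx
        simp [hls, hx]
    | inr ep =>
      rw [outerA_of_inr regex.toList i.toNat 0 ep hin i.toNat 0]
      have hr2 : ¬ 0 < ((regex.toList.drop i.toNat).reverse).foldl pvStepR 0 := by
        have h3 := rightScanB_eq_innerA regex.toList i.toNat 0
        rw [hin, hRb] at h3
        exact of_decide_eq_false h3
      rw [if_neg (by tauto)]
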